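-- pv_equiv track=rewrite | github.com/thegreatcircledata/great-circle-analysis | outputs/subterranean_archaeology/00_subterranean_site_data.py | classify_subterranean
-- ===== SOURCE A (Python) =====
-- UTILITARIAN_KEYWORDS = [
--     "mine", "quarry", "aqueduct", "puquio", "qanat",
--     "cistern", "well", "drain", "sewer", "storage",
--     "foggara", "irrigation",
-- ]
--
-- def classify_subterranean(name, type_str, description=""):
--     """Classify a subterranean site into one of 5 categories."""
--     text = f"{name} {type_str} {description}".lower()
--
--     # Check utilitarian first (mines, aqueducts)
--     if any(kw in text for kw in UTILITARIAN_KEYWORDS):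
--         return "utilitarian"
--
--     # Artificial underground complex (cities, multi-level systems)
--     if any(kw in text for kw in ["underground city", "derinkuyu", "kaymakli",
--                                    "özkonak", "underground dwelling",
--                                    "subterranean city", "catacomb"]):
--         return "artificial_complex"
--
--     # Rock-cut monumental (temples, tombs carved from rock)
--     if "rock-cut" in text or "rock cut" in text or "rupestre" in text:
--         if any(kw in text for kw in ["temple", "church", "tomb", "necropolis"]):
--             return "rock_cut_monumental"
--         return "rock_cut_monumental"  # rock-cut anything is monumental
--
--     # Check if it has monumental indicators
--     if any(kw in text for kw in ["temple", "tomb", "necropolis", "serapeum",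
--                                    "hypogeum", "mausoleum", "palace"]):
--         return "rock_cut_monumental"
--
--     # Modified cave (paintings, carvings, architectural additions)
--     if any(kw in text for kw in ["painting", "art", "carving", "decorated",
--                                    "burial", "ritual", "modified"]):
--         return "modified_cave"
--
--     # Default: natural cave with human use
--     return "natural_cave"
-- ===== SOURCE B (Python) =====
-- # Single left-to-right scan: at each text position, any keyword starting there
-- # lowers a running minimum priority; the final minimum selects the category.
-- _GROUPS = [
--     (0, ["mine", "quarry", "aqueduct", "puquio", "qanat",
--          "cistern", "well", "drain", "sewer", "storage",
--          "foggara", "irrigation"]),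
--     (1, ["underground city", "derinkuyu", "kaymakli",
--          "\u00f6zkonak", "underground dwelling",
--          "subterranean city", "catacomb"]),
--     (2, ["rock-cut", "rock cut", "rupestre", "temple",
--          "tomb", "necropolis", "serapeum", "hypogeum",
--          "mausoleum", "palace"]),
--     (3, ["painting", "art", "carving", "decorated",
--          "burial", "ritual", "modified"]),
-- ]
--
-- _CATEGORIES = ["utilitarian", "artificial_complex", "rock_cut_monumental",
--                "modified_cave", "natural_cave"]
--
--
-- def classify_subterranean(name, type_str, description=""):
--     """Classify a subterranean site into one of 5 categories."""
--     text = f"{name} {type_str} {description}".lower()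
--     best = 4  # index of "natural_cave": no keyword seen yet
--     for i in range(len(text)):
--         for pri, kws in _GROUPS:
--             if any(text.startswith(kw, i) for kw in kws):
--                 best = min(best, pri)
--     return _CATEGORIES[best]
-- ===== Notes on version B (the rewrite author's own statement) =====
-- stated objective: alternative
-- what changed: Replaces A's staged if-chain of full-text substring searches (with its redundant rock-cut nested block) by a single left-to-right scan over the text positions that keeps a running minimum keyword priority (prefix match at each position) and indexes a category table with the final minimum.
import Mathlib
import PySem

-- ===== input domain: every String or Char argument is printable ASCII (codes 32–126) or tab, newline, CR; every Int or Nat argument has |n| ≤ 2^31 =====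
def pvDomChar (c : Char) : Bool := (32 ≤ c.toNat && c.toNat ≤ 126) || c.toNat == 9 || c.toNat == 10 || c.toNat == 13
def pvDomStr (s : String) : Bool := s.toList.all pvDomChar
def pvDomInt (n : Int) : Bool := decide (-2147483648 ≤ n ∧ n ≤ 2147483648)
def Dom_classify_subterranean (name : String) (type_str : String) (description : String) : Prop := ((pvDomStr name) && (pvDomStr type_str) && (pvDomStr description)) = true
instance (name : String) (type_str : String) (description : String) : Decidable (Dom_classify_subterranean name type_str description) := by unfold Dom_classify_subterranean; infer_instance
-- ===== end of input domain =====

-- ===== PORT A =====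
-- B replaces A's staged full-text substring searches by one left-to-right scan over the
-- text positions keeping a running minimum keyword priority; a category table indexed by
-- the final minimum gives the answer. Alternative decomposition, same asymptotic cost.
def classify_subterranean (name : String) (type_str : String) (description : String) : String :=
  let text := PySem.Str.lower (PySem.Str.join " " [name, type_str, description])
  if [
      "mine", "quarry", "aqueduct", "puquio", "qanat",
      "cistern", "well", "drain", "sewer", "storage",
      "foggara", "irrigation"].any (fun kw => PySem.Str.isIn kw text) then "utilitarian"
  else if ["underground city", "derinkuyu", "kaymakli",
      "özkonak", "underground dwelling",
      "subterranean city", "catacomb"].any (fun kw => PySem.Str.isIn kw text) then "artificial_complex"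
  else if PySem.Str.isIn "rock-cut" text || PySem.Str.isIn "rock cut" text || PySem.Str.isIn "rupestre" text then
    (if ["temple", "church", "tomb", "necropolis"].any (fun kw => PySem.Str.isIn kw text) then "rock_cut_monumental"
     else "rock_cut_monumental")
  else if ["temple", "tomb", "necropolis", "serapeum",
      "hypogeum", "mausoleum", "palace"].any (fun kw => PySem.Str.isIn kw text) then "rock_cut_monumental"
  else if ["painting", "art", "carving", "decorated",
      "burial", "ritual", "modified"].any (fun kw => PySem.Str.isIn kw text) then "modified_cave"
  else "natural_cave"

-- ===== PORT B =====
-- the _GROUPS table of Source B, keywords as char lists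
def pvGroups : List (Nat × List (List Char)) := [
  (0, ["mine".toList, "quarry".toList, "aqueduct".toList, "puquio".toList, "qanat".toList,
       "cistern".toList, "well".toList, "drain".toList, "sewer".toList, "storage".toList,
       "foggara".toList, "irrigation".toList]),
  (1, ["underground city".toList, "derinkuyu".toList, "kaymakli".toList,
       "özkonak".toList, "underground dwelling".toList,
       "subterranean city".toList, "catacomb".toList]),
  (2, ["rock-cut".toList, "rock cut".toList, "rupestre".toList, "temple".toList,
       "tomb".toList, "necropolis".toList, "serapeum".toList, "hypogeum".toList,
       "mausoleum".toList, "palace".toList]),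
  (3, ["painting".toList, "art".toList, "carving".toList, "decorated".toList,
       "burial".toList, "ritual".toList, "modified".toList])]

def pvCategories : List String :=
  ["utilitarian", "artificial_complex", "rock_cut_monumental", "modified_cave", "natural_cave"]

-- the inner 'for pri, kws in _GROUPS' loop at one position (text.startswith(kw, i) = prefix of the suffix)
def pvStep (s : List Char) (b : Nat) : Nat :=
  pvGroups.foldl (fun b pg => if pg.2.any (fun kw => kw.isPrefixOf s) then min b pg.1 else b) b

-- the outer 'for i in range(len(text))' loop, as recursion over the suffixes of the text
def pvScan : List Char → Nat → Nat
  | [], b => b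
  | c :: rest, b => pvScan rest (pvStep (c :: rest) b)

def classify_subterranean_alt (name : String) (type_str : String) (description : String) : String :=
  let text := PySem.Str.lower (PySem.Str.join " " [name, type_str, description])
  pvCategories.getD (pvScan text.toList 4) "natural_cave"

-- ===== PRECONDITION & SPEC =====
def Spec_classify_subterranean (name : String) (type_str : String) (description : String) (out : String) : Prop := out = classify_subterranean_alt name type_str description
instance (name : String) (type_str : String) (description : String) (out : String) : Decidable (Spec_classify_subterranean name type_str description out) := by unfold Spec_classify_subterranean; infer_instance

-- ===== CLAIM (what is proved, stated in full; the proofs are below) =====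
def Claim_equal_classify_subterranean : Prop := ∀ (name : String) (type_str : String) (description : String), Dom_classify_subterranean name type_str description → Spec_classify_subterranean name type_str description (classify_subterranean name type_str description)

-- ===== LEMMAS AND PROOFS =====

-- the four keyword groups (the entries of pvGroups, named for the proofs)
def pvG0 : List (List Char) :=
  ["mine".toList, "quarry".toList, "aqueduct".toList, "puquio".toList, "qanat".toList,
   "cistern".toList, "well".toList, "drain".toList, "sewer".toList, "storage".toList,
   "foggara".toList, "irrigation".toList]
def pvG1 : List (List Char) :=
  ["underground city".toList, "derinkuyu".toList, "kaymakli".toList,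
   "özkonak".toList, "underground dwelling".toList,
   "subterranean city".toList, "catacomb".toList]
def pvG2 : List (List Char) :=
  ["rock-cut".toList, "rock cut".toList, "rupestre".toList, "temple".toList,
   "tomb".toList, "necropolis".toList, "serapeum".toList, "hypogeum".toList,
   "mausoleum".toList, "palace".toList]
def pvG3 : List (List Char) :=
  ["painting".toList, "art".toList, "carving".toList, "decorated".toList,
   "burial".toList, "ritual".toList, "modified".toList]

lemma pvGroups_eq : pvGroups = [(0, pvG0), (1, pvG1), (2, pvG2), (3, pvG3)] := rfl

-- group-level 'some keyword occurs somewhere in l' test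
def pvHit (g : List (List Char)) (l : List Char) : Bool :=
  g.any (fun kw => PySem.Chars.isIn kw l)

-- minimum priority whose group has a keyword occurring in l (4 = none)
def pvM (l : List Char) : Nat :=
  if pvHit pvG0 l then 0
  else if pvHit pvG1 l then 1
  else if pvHit pvG2 l then 2
  else if pvHit pvG3 l then 3
  else 4

-- minimum priority whose group has a keyword that is a PREFIX of s (4 = none)
def pvP (s : List Char) : Nat :=
  if pvG0.any (fun kw => kw.isPrefixOf s) then 0
  else if pvG1.any (fun kw => kw.isPrefixOf s) then 1
  else if pvG2.any (fun kw => kw.isPrefixOf s) then 2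
  else if pvG3.any (fun kw => kw.isPrefixOf s) then 3
  else 4

lemma pvStep_eq_min (s : List Char) (b : Nat) (hb : b ≤ 4) : pvStep s b = min b (pvP s) := by
  simp only [pvStep, pvGroups_eq, pvP, List.foldl]
  split_ifs <;> simp_all [Nat.min_def] <;> split_ifs <;> omega

lemma pvHit_cons (g : List (List Char)) (c : Char) (rest : List Char) :
    pvHit g (c :: rest) = (g.any (fun kw => kw.isPrefixOf (c :: rest)) || pvHit g rest) := by
  apply Bool.eq_iff_iff.mpr
  simp only [pvHit, List.any_eq_true, Bool.or_eq_true, PySem.Chars.isIn_iff_infix,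
    List.infix_cons_iff, List.isPrefixOf_iff_prefix]
  exact ⟨fun ⟨x, hx, h⟩ => h.elim (fun h => Or.inl ⟨x, hx, h⟩) (fun h => Or.inr ⟨x, hx, h⟩),
    fun h => h.elim (fun ⟨x, hx, h⟩ => ⟨x, hx, Or.inl h⟩) (fun ⟨x, hx, h⟩ => ⟨x, hx, Or.inr h⟩)⟩

lemma pvM_cons (c : Char) (rest : List Char) :
    pvM (c :: rest) = min (pvP (c :: rest)) (pvM rest) := by
  simp only [pvM, pvP, pvHit_cons, Bool.or_eq_true]
  split_ifs <;> simp_all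

lemma pvM_nil : pvM [] = 4 := by decide

lemma pvScan_eq_min (l : List Char) : ∀ b : Nat, b ≤ 4 → pvScan l b = min b (pvM l) := by
  induction l with
  | nil => intro b hb; simp only [pvScan, pvM_nil]; omega
  | cons c rest ih =>
      intro b hb
      have hb' : min b (pvP (c :: rest)) ≤ 4 := le_trans (Nat.min_le_left _ _) hb
      rw [pvScan, pvStep_eq_min _ _ hb, ih _ hb', pvM_cons, min_assoc]

lemma pvM_le_four (l : List Char) : pvM l ≤ 4 := by
  simp only [pvM]; split_ifs <;> omega

-- ===== VERDICT (by name: the statement is the Claim_ definition above) =====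
theorem classify_subterranean_spec : Claim_equal_classify_subterranean := by
  intro name type_str description _
  unfold Spec_classify_subterranean
  simp only [classify_subterranean, classify_subterranean_alt]
  rw [pvScan_eq_min _ 4 (by omega)]
  have h4 := pvM_le_four (PySem.Str.lower (PySem.Str.join " " [name, type_str, description])).toList
  have hmin : min 4 (pvM (PySem.Str.lower (PySem.Str.join " " [name, type_str, description])).toList)
      = pvM (PySem.Str.lower (PySem.Str.join " " [name, type_str, description])).toList := by omega
  rw [hmin]
  generalize (PySem.Str.lower (PySem.Str.join " " [name, type_str, description])) = text
  simp only [pvM, pvHit, pvG0, pvG1, pvG2, pvG3, pvCategories, List.any_cons, List.any_nil,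
    PySem.Str.isIn_eq, Bool.or_false, Bool.or_eq_true]
  split_ifs <;> simp_all
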